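-- pv_equiv track=rewrite | github.com/conjuncts/gmft | gmft/algorithm/structure_rewrite.py | rect_iter
-- ===== SOURCE A (Python) =====
-- def rect_iter(x1, y1, x2, y2, x_step=1, y_step=1, column_major=False):
--     """
--     Yields (x, y) coordinates within a 2D rectangle, inclusive of both (x1, y1) and (x2, y2),
--     with configurable step direction and column/row major ordering.
--
--     Args:
--         x1, y1 -- Start coordinates (inclusive)
--         x2, y2 -- End coordinates (inclusive)
--         x_step, y_step -- Step sizes (can be negative)
--         column_major -- If True, iterate columns first , otherwise rows first
--     """
--
--     # Handle inclusive range with direction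
--     if x_step > 0:
--         x_range = range(x1, x2 + 1, x_step)
--     else:
--         x_range = range(x1, x2 - 1, x_step)
--
--     if y_step > 0:
--         y_range = range(y1, y2 + 1, y_step)
--     else:
--         y_range = range(y1, y2 - 1, y_step)
--
--     if column_major:
--         for x in x_range:
--             for y in y_range:
--                 yield (x, y)
--     else:
--         for y in y_range:
--             for x in x_range:
--                 yield (x, y)
-- ===== SOURCE B (Python) =====
-- def rect_iter(x1, y1, x2, y2, x_step=1, y_step=1, column_major=False):
--     """Same coordinates as A, emitted by one flat index loop with divmod
--     arithmetic instead of two nested loops (range len/indexing are O(1))."""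
--     x_stop = (x2 + 1) if x_step > 0 else (x2 - 1)
--     y_stop = (y2 + 1) if y_step > 0 else (y2 - 1)
--     lx = len(range(x1, x_stop, x_step))
--     ly = len(range(y1, y_stop, y_step))
--     for i in range(lx * ly):
--         if column_major:
--             yield (range(x1, x_stop, x_step)[i // ly], range(y1, y_stop, y_step)[i % ly])
--         else:
--             yield (range(x1, x_stop, x_step)[i % lx], range(y1, y_stop, y_step)[i // lx])
-- ===== Notes on version B (the rewrite author's own statement) =====
-- stated objective: alternative
-- what changed: Replaces the two nested yield loops by one flat loop over a single index i in range(lx*ly), recovering the coordinates from x_range/y_range by divmod index arithmetic.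
import Mathlib
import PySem

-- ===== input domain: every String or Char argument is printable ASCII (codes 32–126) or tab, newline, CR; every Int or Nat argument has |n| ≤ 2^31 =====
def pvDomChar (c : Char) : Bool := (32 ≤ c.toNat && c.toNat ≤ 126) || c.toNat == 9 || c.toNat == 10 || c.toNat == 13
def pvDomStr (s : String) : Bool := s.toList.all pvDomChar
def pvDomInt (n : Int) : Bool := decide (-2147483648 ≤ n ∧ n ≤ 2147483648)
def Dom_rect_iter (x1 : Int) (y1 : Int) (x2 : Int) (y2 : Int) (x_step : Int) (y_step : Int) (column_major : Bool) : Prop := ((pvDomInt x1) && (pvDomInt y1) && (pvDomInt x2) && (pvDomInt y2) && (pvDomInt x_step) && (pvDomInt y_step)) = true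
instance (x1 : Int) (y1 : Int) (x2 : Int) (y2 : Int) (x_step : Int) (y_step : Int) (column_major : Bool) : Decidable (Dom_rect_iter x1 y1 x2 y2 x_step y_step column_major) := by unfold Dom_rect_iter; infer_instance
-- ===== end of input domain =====

-- B replaces A's two nested yield loops by one flat index loop with divmod arithmetic (alternative decomposition, same cost).

-- ===== PORT A =====
def rect_iter (x1 : Int) (y1 : Int) (x2 : Int) (y2 : Int) (x_step : Int) (y_step : Int) (column_major : Bool) : List (Int × Int) :=
  let x_range := if x_step > 0 then PySem.List.pyRange x1 (x2 + 1) x_step else PySem.List.pyRange x1 (x2 - 1) x_step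
  let y_range := if y_step > 0 then PySem.List.pyRange y1 (y2 + 1) y_step else PySem.List.pyRange y1 (y2 - 1) y_step
  if column_major then
    x_range.flatMap (fun x => y_range.map (fun y => (x, y)))
  else
    y_range.flatMap (fun y => x_range.map (fun x => (x, y)))

-- ===== PORT B =====
-- len(range(start, stop, step)) — CPython computes this length by exactly this O(1) formula (exact for step ≠ 0)
def pvRangeLen (start stop step : Int) : Nat :=
  if 0 < step then (if start < stop then ((stop - start + step - 1) / step).toNat else 0)
  else (if stop < start then ((start - stop + -step - 1) / -step).toNat else 0)

-- one flat loop; the indices i // l and i % l are always in range, so the pyGetD default 0 is never used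
def rect_iter_alt (x1 : Int) (y1 : Int) (x2 : Int) (y2 : Int) (x_step : Int) (y_step : Int) (column_major : Bool) : List (Int × Int) :=
  let x_stop := if x_step > 0 then x2 + 1 else x2 - 1
  let y_stop := if y_step > 0 then y2 + 1 else y2 - 1
  let lx : Int := pvRangeLen x1 x_stop x_step
  let ly : Int := pvRangeLen y1 y_stop y_step
  (PySem.List.pyRange 0 (lx * ly) 1).map (fun i =>
    if column_major then
      (PySem.List.pyGetD (PySem.List.pyRange x1 x_stop x_step) (PySem.Int.floordiv i ly) 0,
       PySem.List.pyGetD (PySem.List.pyRange y1 y_stop y_step) (PySem.Int.mod i ly) 0)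
    else
      (PySem.List.pyGetD (PySem.List.pyRange x1 x_stop x_step) (PySem.Int.mod i lx) 0,
       PySem.List.pyGetD (PySem.List.pyRange y1 y_stop y_step) (PySem.Int.floordiv i lx) 0))

-- ===== PRECONDITION & SPEC =====
-- A (and B) raise ValueError from range(..., 0) when a step is zero; exactly those inputs are excluded.
def Pre_rect_iter (x1 : Int) (y1 : Int) (x2 : Int) (y2 : Int) (x_step : Int) (y_step : Int) (column_major : Bool) : Prop := x_step ≠ 0 ∧ y_step ≠ 0
instance (x1 : Int) (y1 : Int) (x2 : Int) (y2 : Int) (x_step : Int) (y_step : Int) (column_major : Bool) : Decidable (Pre_rect_iter x1 y1 x2 y2 x_step y_step column_major) := by unfold Pre_rect_iter; infer_instance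
def pvWitness_rect_iter : Int × Int × Int × Int × Int × Int × Bool := (0, 0, 2, 1, 1, 1, false)

def Spec_rect_iter (x1 : Int) (y1 : Int) (x2 : Int) (y2 : Int) (x_step : Int) (y_step : Int) (column_major : Bool) (out : List (Int × Int)) : Prop := out = rect_iter_alt x1 y1 x2 y2 x_step y_step column_major
instance (x1 : Int) (y1 : Int) (x2 : Int) (y2 : Int) (x_step : Int) (y_step : Int) (column_major : Bool) (out : List (Int × Int)) : Decidable (Spec_rect_iter x1 y1 x2 y2 x_step y_step column_major out) := by unfold Spec_rect_iter; infer_instance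

-- ===== CLAIM (what is proved, stated in full; the proofs are below) =====
def Claim_equal_rect_iter : Prop := ∀ (x1 : Int) (y1 : Int) (x2 : Int) (y2 : Int) (x_step : Int) (y_step : Int) (column_major : Bool), Dom_rect_iter x1 y1 x2 y2 x_step y_step column_major → Pre_rect_iter x1 y1 x2 y2 x_step y_step column_major → Spec_rect_iter x1 y1 x2 y2 x_step y_step column_major (rect_iter x1 y1 x2 y2 x_step y_step column_major)

-- ===== LEMMAS AND PROOFS =====

-- reading off a list by indices 0..len-1 is the list itself
theorem pv_map_range_getD {α γ : Type} (xs : List α) (a : α) (f : α → γ) :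
    (List.range xs.length).map (fun k => f (xs.getD k a)) = xs.map f := by
  apply List.ext_getElem
  · simp
  · intro n h1 h2
    simp only [List.getElem_map, List.getElem_range]
    rw [List.getD_eq_getElem xs a (by simpa using h2)]

-- pvRangeLen is the length of the materialized range (for step ≠ 0)
theorem pvRangeLen_eq (a b s : Int) (h : s ≠ 0) :
    (pvRangeLen a b s : Int) = ((PySem.List.pyRange a b s).length : Int) := by
  simp [pvRangeLen, PySem.List.pyRange, h]

-- nested loops = one flat loop with divmod indexing (Nat form)
theorem pv_flat_core {α β γ : Type} (xs : List α) (ys : List β) (a : α) (b : β) (g : α → β → γ) :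
    ys.flatMap (fun y => xs.map (fun x => g x y)) =
      (List.range (xs.length * ys.length)).map
        (fun k => g (xs.getD (k % xs.length) a) (ys.getD (k / xs.length) b)) := by
  rcases xs with _ | ⟨x, xs'⟩
  · simp
  · set xs : List α := x :: xs' with hxs
    have hlx : 0 < xs.length := by simp [hxs]
    induction ys with
    | nil => simp
    | cons y t ih =>
      have hsplit : xs.length * (y :: t).length = xs.length + xs.length * t.length := by
        simp [List.length_cons, Nat.mul_succ, Nat.add_comm]
      rw [List.flatMap_cons, ih, hsplit, List.range_add, List.map_append, List.map_map]
      congr 1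
      · rw [← pv_map_range_getD xs a (fun x => g x y)]
        apply List.map_congr_left
        intro k hk
        have hk' : k < xs.length := by simpa using hk
        simp [Nat.mod_eq_of_lt hk', Nat.div_eq_of_lt hk']
      · apply List.map_congr_left
        intro k hk
        have h1 : (xs.length + k) % xs.length = k % xs.length := by
          simpa using Nat.add_mod_left xs.length k
        have h2 : (xs.length + k) / xs.length = k / xs.length + 1 := by
          rw [Nat.add_comm, Nat.add_div_right k hlx]
        simp [Function.comp, h1, h2]

-- bridge the Int-indexed flat loops of the port to the Nat form (row-major orientation)
theorem pv_flat_int_row (xs ys : List Int) :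
    (PySem.List.pyRange 0 ((xs.length : Int) * (ys.length : Int)) 1).map
        (fun i => (PySem.List.pyGetD xs (PySem.Int.mod i (xs.length : Int)) 0,
                   PySem.List.pyGetD ys (PySem.Int.floordiv i (xs.length : Int)) 0)) =
      (List.range (xs.length * ys.length)).map
        (fun k => (xs.getD (k % xs.length) 0, ys.getD (k / xs.length) 0)) := by
  have h : ((xs.length : Int) * (ys.length : Int)) = ((xs.length * ys.length : Nat) : Int) := by
    push_cast; ring
  rw [h, PySem.List.pyRange_zero_nat, List.map_map]
  apply List.map_congr_left
  intro k _
  simp only [Function.comp, PySem.Int.mod_natCast, PySem.Int.floordiv_natCast,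
    PySem.List.pyGetD_natCast]

-- column-major orientation
theorem pv_flat_int_col (xs ys : List Int) :
    (PySem.List.pyRange 0 ((ys.length : Int) * (xs.length : Int)) 1).map
        (fun i => (PySem.List.pyGetD xs (PySem.Int.floordiv i (ys.length : Int)) 0,
                   PySem.List.pyGetD ys (PySem.Int.mod i (ys.length : Int)) 0)) =
      (List.range (ys.length * xs.length)).map
        (fun k => (xs.getD (k / ys.length) 0, ys.getD (k % ys.length) 0)) := by
  have h : ((ys.length : Int) * (xs.length : Int)) = ((ys.length * xs.length : Nat) : Int) := by
    push_cast; ring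
  rw [h, PySem.List.pyRange_zero_nat, List.map_map]
  apply List.map_congr_left
  intro k _
  simp only [Function.comp, PySem.Int.mod_natCast, PySem.Int.floordiv_natCast,
    PySem.List.pyGetD_natCast]

-- ===== VERDICT (by name: the statement is the Claim_ definition above) =====
theorem rect_iter_spec : Claim_equal_rect_iter := by
  intro x1 y1 x2 y2 x_step y_step column_major _ hpre
  obtain ⟨hx0, hy0⟩ := hpre
  unfold Spec_rect_iter rect_iter rect_iter_alt
  dsimp only
  rw [show (if x_step > 0 then PySem.List.pyRange x1 (x2 + 1) x_step
        else PySem.List.pyRange x1 (x2 - 1) x_step)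
      = PySem.List.pyRange x1 (if x_step > 0 then x2 + 1 else x2 - 1) x_step from
      (apply_ite (fun b => PySem.List.pyRange x1 b x_step) _ _ _).symm,
    show (if y_step > 0 then PySem.List.pyRange y1 (y2 + 1) y_step
        else PySem.List.pyRange y1 (y2 - 1) y_step)
      = PySem.List.pyRange y1 (if y_step > 0 then y2 + 1 else y2 - 1) y_step from
      (apply_ite (fun b => PySem.List.pyRange y1 b y_step) _ _ _).symm,
    pvRangeLen_eq x1 _ x_step hx0, pvRangeLen_eq y1 _ y_step hy0]
  set xr := PySem.List.pyRange x1 (if x_step > 0 then x2 + 1 else x2 - 1) x_step with hxr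
  set yr := PySem.List.pyRange y1 (if y_step > 0 then y2 + 1 else y2 - 1) y_step with hyr
  cases column_major with
  | false =>
    simp only [Bool.false_eq_true, reduceIte]
    rw [pv_flat_int_row xr yr]
    exact pv_flat_core xr yr 0 0 (fun x y => (x, y))
  | true =>
    simp only [reduceIte]
    have hc : ((xr.length : Int) * (yr.length : Int)) = ((yr.length : Int) * (xr.length : Int)) := by ring
    rw [hc, pv_flat_int_col xr yr]
    exact pv_flat_core yr xr 0 0 (fun y x => (x, y))
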